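-- pv_equiv track=rewrite | github.com/lemoneeing/coding-test | Programmers/emergency_boat.py | solution
-- ===== SOURCE A (Python) =====
-- def solution(people, limit):
--     people.sort()
--     crit = limit/2
--
--     s_w = []
--     h_w = []
--     for w in people:
--         if w <= crit:
--             s_w.append(w)
--         else:
--             h_w.append(w)
--
--     boat = 0
--     hi=len(h_w)-1
--     while s_w and h_w and hi >= 0:
--         sw = s_w[0]
--         hw = h_w[hi]
--
--         if sw + hw <= limit:
--             boat += 1
--             s_w.pop(0)
--             h_w.pop(hi)
--         hi -= 1
--
--
--     if s_w:
--         if len(s_w) % 2 ==0: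
--             boat += int(len(s_w)/2)
--         else:
--             boat += (int(len(s_w)/2) + 1)
--
--     if h_w:
--         boat += len(h_w)
--
--     return boat
-- ===== SOURCE B (Python) =====
-- def solution(people, limit):
--     ps = sorted(people)
--     k = 0
--     for w in ps:
--         if 2 * w <= limit:
--             k += 1
--         else:
--             break
--     h = ps[k:]
--     si = 0
--     popped = 0
--     hi = len(h) - 1
--     boat = 0
--     while si < k and popped < len(h) and hi >= 0:
--         if ps[si] + h[hi] <= limit:
--             boat += 1
--             si += 1
--             popped += 1
--         hi -= 1
--     boat += (k - si + 1) // 2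
--     boat += len(h) - popped
--     return boat
-- ===== Notes on version B (the rewrite author's own statement) =====
-- stated objective: faster
-- what changed: B replaces A's list-mutating loop (s_w.pop(0) and h_w.pop(hi), each O(n)) by two index pointers over the sorted list plus a popped counter, and replaces A's partition pass by counting the small prefix of the sorted list, giving O(n log n) total instead of O(n^2).
import Mathlib
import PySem

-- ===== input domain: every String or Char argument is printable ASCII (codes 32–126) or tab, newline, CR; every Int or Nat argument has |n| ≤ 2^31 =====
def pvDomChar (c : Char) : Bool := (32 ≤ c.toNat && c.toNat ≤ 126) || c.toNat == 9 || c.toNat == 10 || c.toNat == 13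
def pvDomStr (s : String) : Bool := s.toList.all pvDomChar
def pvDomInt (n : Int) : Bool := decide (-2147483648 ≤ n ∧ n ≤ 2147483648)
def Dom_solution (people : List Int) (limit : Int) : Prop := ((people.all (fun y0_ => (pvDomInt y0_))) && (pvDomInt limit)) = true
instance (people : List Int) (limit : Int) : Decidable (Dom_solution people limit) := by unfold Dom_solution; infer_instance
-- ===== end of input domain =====

-- B: two index pointers + a popped counter instead of A's O(n) list pops → O(n log n); A sorts `people`
-- in place (B does not mutate it) — the equivalence proved here is about the return value only.


-- ===== PORT A =====
-- A's while loop; state = (s_w, h_w, hi, boat); returns the residual (s_w, h_w, boat).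
-- s_w[0] / h_w[hi] are always in range inside the loop, so pyGetD's default is never used;
-- pop?'s getD fallback is likewise unreachable.
def solutionLoopA (limit : Int) (s h : List Int) (hi boat : Int) : List Int × List Int × Int :=
  if s ≠ [] ∧ h ≠ [] ∧ 0 ≤ hi then
    let sw := PySem.List.pyGetD s 0 0
    let hw := PySem.List.pyGetD h hi 0
    if sw + hw ≤ limit then
      solutionLoopA limit (((PySem.List.pop? s 0).map Prod.snd).getD s)
        (((PySem.List.pop? h hi).map Prod.snd).getD h) (hi - 1) (boat + 1)
    else
      solutionLoopA limit s h (hi - 1) boat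
  else (s, h, boat)
termination_by (hi + 1).toNat
decreasing_by all_goals omega

def solution (people : List Int) (limit : Int) : Int :=
  let ps := PySem.List.sorted people (fun x => x) false
  -- `w <= crit` with crit = limit/2 (an exact half-integer float) is exactly 2*w ≤ limit
  let sh := ps.foldl (fun (acc : List Int × List Int) w =>
      if 2 * w ≤ limit then (acc.1 ++ [w], acc.2) else (acc.1, acc.2 ++ [w])) ([], [])
  let r := solutionLoopA limit sh.1 sh.2 ((sh.2.length : Int) - 1) 0
  let s_w := r.1
  let h_w := r.2.1
  let boat := r.2.2
  let boat := if s_w ≠ [] then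
      (if PySem.Int.mod (s_w.length : Int) 2 = 0 then boat + PySem.Int.floordiv (s_w.length : Int) 2
       else boat + (PySem.Int.floordiv (s_w.length : Int) 2 + 1))
    else boat
  let boat := if h_w ≠ [] then boat + (h_w.length : Int) else boat
  boat

-- ===== PORT B =====
-- B's `for w in ps: if 2*w <= limit: k += 1 else: break`
def countSmall (limit : Int) : List Int → Int
  | [] => 0
  | w :: ws => if 2 * w ≤ limit then 1 + countSmall limit ws else 0

-- B's while loop over index pointers; returns the final (si, popped, boat).
def solutionLoopB (limit : Int) (ps h : List Int) (k si popped hi boat : Int) :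
    Int × Int × Int :=
  if si < k ∧ popped < (h.length : Int) ∧ 0 ≤ hi then
    if PySem.List.pyGetD ps si 0 + PySem.List.pyGetD h hi 0 ≤ limit then
      solutionLoopB limit ps h k (si + 1) (popped + 1) (hi - 1) (boat + 1)
    else
      solutionLoopB limit ps h k si popped (hi - 1) boat
  else (si, popped, boat)
termination_by (hi + 1).toNat
decreasing_by all_goals omega

def solution_alt (people : List Int) (limit : Int) : Int :=
  let ps := PySem.List.sorted people (fun x => x) false
  let k := countSmall limit ps
  let h := PySem.List.slice ps (some k) none
  let r := solutionLoopB limit ps h k 0 0 ((h.length : Int) - 1) 0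
  r.2.2 + PySem.Int.floordiv (k - r.1 + 1) 2 + ((h.length : Int) - r.2.1)

-- ===== PRECONDITION & SPEC =====
def Spec_solution (people : List Int) (limit : Int) (out : Int) : Prop := out = solution_alt people limit
instance (people : List Int) (limit : Int) (out : Int) : Decidable (Spec_solution people limit out) := by unfold Spec_solution; infer_instance

-- ===== CLAIM (what is proved, stated in full; the proofs are below) =====
def Claim_equal_solution : Prop := ∀ (people : List Int) (limit : Int), Dom_solution people limit → Spec_solution people limit (solution people limit)

-- ===== LEMMAS AND PROOFS =====

theorem countSmall_eq_takeWhile (limit : Int) (ps : List Int) :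
    countSmall limit ps = ((ps.takeWhile (fun w => decide (2 * w ≤ limit))).length : Int) := by
  induction ps with
  | nil => simp [countSmall]
  | cons w ws ih =>
    by_cases h : 2 * w ≤ limit <;> simp [countSmall, h, ih] <;> omega

theorem partition_foldl (limit : Int) (ps : List Int) : ∀ (a b : List Int),
    ps.foldl (fun (acc : List Int × List Int) w =>
      if 2 * w ≤ limit then (acc.1 ++ [w], acc.2) else (acc.1, acc.2 ++ [w])) (a, b)
    = (a ++ ps.filter (fun w => decide (2 * w ≤ limit)),
       b ++ ps.filter (fun w => decide ¬(2 * w ≤ limit))) := by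
  induction ps with
  | nil => simp
  | cons w ws ih =>
    intro a b
    by_cases h : 2 * w ≤ limit <;>
      simp only [List.foldl_cons, h, if_true, if_false, ih, List.filter_cons, decide_true,
        decide_false, decide_not, not_true, not_false_iff, Bool.not_true, Bool.not_false,
        ite_true, ite_false, List.append_assoc, List.singleton_append, if_pos, if_neg] <;>
      simp [h]

theorem filter_eq_takeWhile_of_sorted (limit : Int) (ps : List Int)
    (hs : ps.Pairwise (· ≤ ·)) :
    ps.filter (fun w => decide (2 * w ≤ limit)) = ps.takeWhile (fun w => decide (2 * w ≤ limit))
    ∧ ps.filter (fun w => decide ¬(2 * w ≤ limit)) = ps.dropWhile (fun w => decide (2 * w ≤ limit)) := by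
  induction ps with
  | nil => simp
  | cons w ws ih =>
    rcases List.pairwise_cons.mp hs with ⟨hw, hws⟩
    by_cases h : 2 * w ≤ limit
    · obtain ⟨h1, h2⟩ := ih hws
      constructor
      · rw [List.takeWhile_cons, List.filter_cons]
        simp [h, h1]
      · rw [List.dropWhile_cons, List.filter_cons]
        simp only [h, decide_true, if_true, not_true, decide_false, Bool.false_eq_true, if_false]
        exact h2
    · have hall : ∀ x ∈ ws, ¬ (2 * x ≤ limit) := fun x hx hc => h (by have := hw x hx; omega)
      constructor
      · rw [List.takeWhile_cons, List.filter_cons]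
        simp only [h, decide_false, Bool.false_eq_true, if_false]
        exact List.filter_eq_nil_iff.mpr (by simpa using hall)
      · rw [List.dropWhile_cons, List.filter_cons]
        simp only [h, decide_false, Bool.false_eq_true, if_false, decide_not, Bool.not_false,
          if_true, ite_true]
        congr 1
        exact List.filter_eq_self.mpr (by simpa using hall)

-- main loop correspondence: A's loop on (s0.drop si, prefix of h0 ++ survivors) equals
-- B's pointer loop on (s0 ++ h0, h0) with counters (si, p).

theorem loopA_exit (limit : Int) (s h : List Int) (hi boat : Int)
    (hc : ¬(s ≠ [] ∧ h ≠ [] ∧ 0 ≤ hi)) :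
    solutionLoopA limit s h hi boat = (s, h, boat) := by
  rw [solutionLoopA, if_neg hc]

theorem loopA_step (limit : Int) (s h : List Int) (hi boat : Int)
    (hc : s ≠ [] ∧ h ≠ [] ∧ 0 ≤ hi) :
    solutionLoopA limit s h hi boat =
      if PySem.List.pyGetD s 0 0 + PySem.List.pyGetD h hi 0 ≤ limit then
        solutionLoopA limit (((PySem.List.pop? s 0).map Prod.snd).getD s)
          (((PySem.List.pop? h hi).map Prod.snd).getD h) (hi - 1) (boat + 1)
      else solutionLoopA limit s h (hi - 1) boat := by
  rw [solutionLoopA, if_pos hc]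

theorem loopB_exit (limit : Int) (ps h : List Int) (k si popped hi boat : Int)
    (hc : ¬(si < k ∧ popped < (h.length : Int) ∧ 0 ≤ hi)) :
    solutionLoopB limit ps h k si popped hi boat = (si, popped, boat) := by
  rw [solutionLoopB, if_neg hc]

theorem loopB_step (limit : Int) (ps h : List Int) (k si popped hi boat : Int)
    (hc : si < k ∧ popped < (h.length : Int) ∧ 0 ≤ hi) :
    solutionLoopB limit ps h k si popped hi boat =
      if PySem.List.pyGetD ps si 0 + PySem.List.pyGetD h hi 0 ≤ limit then
        solutionLoopB limit ps h k (si + 1) (popped + 1) (hi - 1) (boat + 1)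
      else solutionLoopB limit ps h k si popped (hi - 1) boat := by
  rw [solutionLoopB, if_pos hc]

theorem loop_rel (limit : Int) (s0 h0 : List Int) :
    ∀ (n : Nat) (hi : Int), (hi + 1).toNat ≤ n →
    ∀ (rest : List Int) (si p : Nat) (boat : Int),
      si ≤ s0.length → (hi + 1).toNat + p + rest.length = h0.length →
      ∃ (si' p' : Nat),
        solutionLoopB limit (s0 ++ h0) h0 (s0.length : Int) (si : Int) (p : Int) hi boat
          = ((si' : Int), (p' : Int),
             (solutionLoopA limit (s0.drop si) (h0.take (hi + 1).toNat ++ rest) hi boat).2.2)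
        ∧ (solutionLoopA limit (s0.drop si) (h0.take (hi + 1).toNat ++ rest) hi boat).1
            = s0.drop si'
        ∧ (solutionLoopA limit (s0.drop si) (h0.take (hi + 1).toNat ++ rest) hi boat).2.1.length
            = h0.length - p'
        ∧ si ≤ si' ∧ si' ≤ s0.length ∧ p ≤ p' ∧ p' ≤ h0.length := by
  intro n
  induction n with
  | zero =>
    intro hi hn rest si p boat hsi hinv
    rw [loopA_exit _ _ _ _ _ (fun h => absurd h.2.2 (by omega)),
      loopB_exit _ _ _ _ _ _ _ _ (fun h => absurd h.2.2 (by omega))]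
    refine ⟨si, p, rfl, rfl, ?_, le_refl _, hsi, le_refl _, by omega⟩
    simp only [List.length_append, List.length_take]
    omega
  | succ n ih =>
    intro hi hn rest si p boat hsi hinv
    have hm : (hi + 1).toNat ≤ h0.length := by omega
    have hlenA : (h0.take (hi + 1).toNat ++ rest).length = h0.length - p := by
      simp only [List.length_append, List.length_take]; omega
    by_cases hc : 0 ≤ hi ∧ si < s0.length ∧ p < h0.length
    · -- both loops take a step
      obtain ⟨hhi0, hsilt, hplt⟩ := hc
      obtain ⟨j, rfl⟩ : ∃ j : Nat, hi = (j : Int) := ⟨hi.toNat, by omega⟩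
      have hT : (((j : Int)) + 1).toNat = j + 1 := by omega
      rw [hT] at hm hlenA hn hinv ⊢
      have hj : j < h0.length := by omega
      have hAne : h0.take (j + 1) ++ rest ≠ [] := by
        intro h; rw [h] at hlenA; simp at hlenA; omega
      have hsne : s0.drop si ≠ [] := by
        intro h; rw [List.drop_eq_nil_iff] at h; omega
      -- the element values agree
      have hswA : PySem.List.pyGetD (s0.drop si) 0 0 = s0.getD si 0 := by
        simp [PySem.List.pyGetD_zero, List.getD, List.getElem?_drop]
      have hswB : PySem.List.pyGetD (s0 ++ h0) (si : Int) 0 = s0.getD si 0 := by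
        simp only [PySem.List.pyGetD_natCast, List.getD]
        rw [List.getElem?_append_left hsilt]
      have hidx : j < (h0.take (j + 1) ++ rest).length := by omega
      have hhwA : PySem.List.pyGetD (h0.take (j + 1) ++ rest) (j : Int) 0
          = h0.getD j 0 := by
        rw [PySem.List.pyGetD_natCast]
        simp only [List.getD]
        rw [List.getElem?_append_left (by simp only [List.length_take]; omega),
          List.getElem?_take_of_lt (by omega)]
      have hhwB : PySem.List.pyGetD h0 (j : Int) 0 = h0.getD j 0 := by
        rw [PySem.List.pyGetD_natCast]
      rw [loopA_step _ _ _ _ _ ⟨hsne, hAne, by omega⟩,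
        loopB_step _ _ _ _ _ _ _ _ ⟨by exact_mod_cast hsilt, by exact_mod_cast hplt, by omega⟩,
        hswA, hswB, hhwA, hhwB]
      have htake : h0.take (j + 1) = h0.take j ++ [h0.getD j 0] := by
        rw [List.take_add_one]
        simp [List.getD, List.getElem?_eq_getElem hj]
      have hnext : ((j : Int) - 1 + 1).toNat = j := by omega
      by_cases hpair : s0.getD si 0 + h0.getD j 0 ≤ limit
      · rw [if_pos hpair, if_pos hpair]
        -- A pops the head of s and index hi of h
        have hpops : ((PySem.List.pop? (s0.drop si) 0).map Prod.snd).getD (s0.drop si)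
            = s0.drop (si + 1) := by
          rw [List.drop_eq_getElem_cons hsilt, PySem.List.pop?_zero_cons]
          rfl
        have hpoph : ((PySem.List.pop? (h0.take (j + 1) ++ rest) (j : Int)).map Prod.snd).getD
              (h0.take (j + 1) ++ rest)
            = h0.take j ++ rest := by
          rw [PySem.List.pop?_natCast _ j hidx]
          simp only [Option.map_some, Option.getD_some]
          rw [htake, List.append_assoc,
            List.eraseIdx_append_of_length_le (by simp only [List.length_take]; omega),
            show j - (h0.take j).length = 0 by simp only [List.length_take]; omega]
          rfl
        rw [hpops, hpoph]
        obtain ⟨si', p', h1, h2, h3, h4, h5, h6, h7⟩ :=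
          ih ((j : Int) - 1) (by omega) rest (si + 1) (p + 1) (boat + 1) (by omega) (by omega)
        rw [hnext] at h1 h2 h3
        refine ⟨si', p', ?_, h2, h3, by omega, h5, by omega, h7⟩
        rw [← h1]
        congr 1 <;> push_cast <;> ring
      · rw [if_neg hpair, if_neg hpair]
        have hsplit : h0.take (j + 1) ++ rest = h0.take j ++ (h0.getD j 0 :: rest) := by
          rw [htake, List.append_assoc]; rfl
        rw [hsplit]
        obtain ⟨si', p', h1, h2, h3, h4, h5, h6, h7⟩ :=
          ih ((j : Int) - 1) (by omega) (h0.getD j 0 :: rest) si p boat hsi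
            (by simp only [List.length_cons]; omega)
        rw [hnext] at h1 h2 h3
        exact ⟨si', p', h1, h2, h3, h4, h5, h6, h7⟩
    · -- both loops exit
      rw [loopA_exit _ _ _ _ _ (fun h => by
            refine hc ⟨h.2.2, ?_, ?_⟩
            · by_contra hx
              exact h.1 (List.drop_eq_nil_iff.mpr (by omega))
            · have := List.ne_nil_iff_length_pos.mp h.2.1
              omega),
        loopB_exit _ _ _ _ _ _ _ _ (fun h => by
            exact hc ⟨h.2.2, by exact_mod_cast h.1, by exact_mod_cast h.2.1⟩)]
      refine ⟨si, p, rfl, rfl, hlenA, le_refl _, hsi, le_refl _, by omega⟩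

-- ===== VERDICT (by name: the statement is the Claim_ definition above) =====
theorem solution_spec : Claim_equal_solution := by
  intro people limit _
  unfold Spec_solution
  show solution people limit = solution_alt people limit
  simp only [solution, solution_alt]
  have hpw : (PySem.List.sorted people (fun x => x) false).Pairwise (· ≤ ·) := by
    simpa using PySem.List.sorted_pairwise people (fun x => x)
  obtain ⟨hf1, hf2⟩ := filter_eq_takeWhile_of_sorted limit _ hpw
  rw [partition_foldl, hf1, hf2, List.nil_append, List.nil_append,
    countSmall_eq_takeWhile]
  set ps := PySem.List.sorted people (fun x => x) false with hps
  set s0 := ps.takeWhile (fun w => decide (2 * w ≤ limit)) with hs0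
  set h0 := ps.dropWhile (fun w => decide (2 * w ≤ limit)) with hh0
  have hsplit : s0 ++ h0 = ps := List.takeWhile_append_dropWhile
  have hslice : PySem.List.slice ps (some (s0.length : Int)) none = h0 := by
    rw [PySem.List.slice_from_natCast, ← hsplit, List.drop_left]
  rw [hslice, ← hsplit]
  obtain ⟨si', p', h1, h2, h3, h4, h5, h6, h7⟩ :=
    loop_rel limit s0 h0 h0.length ((h0.length : Int) - 1) (by omega) [] 0 0 0
      (by omega) (by simp)
  rw [show ((h0.length : Int) - 1 + 1).toNat = h0.length by omega, List.take_length,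
    List.append_nil] at h1 h2 h3
  simp only [List.drop_zero] at h1 h2 h3
  rw [Nat.cast_zero] at h1
  rw [h1, h2]
  have hdropne : (s0.drop si' ≠ []) ↔ si' < s0.length := by
    rw [ne_eq, List.drop_eq_nil_iff]; omega
  have hrne : ((solutionLoopA limit s0 h0 ((h0.length : Int) - 1) 0).2.1 ≠ [])
      ↔ p' < h0.length := by
    rw [← List.length_pos_iff_ne_nil, h3]
    omega
  simp only [hdropne, hrne, h3, List.length_drop,
    PySem.Int.mod_eq_emod_of_pos (by norm_num : (0:Int) < 2),
    PySem.Int.floordiv_eq_ediv_of_pos (by norm_num : (0:Int) < 2)]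
  split_ifs <;> omega
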